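-- pv_equiv track=rewrite | github.com/ej8899/portfolio_v2 | server/log.py | count_log_levels
-- ===== SOURCE A (Python) =====
-- def count_log_levels(log_lines):
--     log_levels_count = {
--         'WARN': 0,
--         'INFO': 0,
--         'ERROR': 0,
--         'FATAL': 0,
--         'DEBUG': 0,
--         'TRACE': 0
--     }
--     #print (log)
--     for line in log_lines:
--         log_message = line.get('log', '')
--         for level in log_levels_count.keys():
--             if f'[{level}]' in log_message:
--                 log_levels_count[level] += 1
--
--     # print (log_levels_count)
--     return log_levels_count
-- ===== SOURCE B (Python) =====
-- LEVELS = ('WARN', 'INFO', 'ERROR', 'FATAL', 'DEBUG', 'TRACE')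
--
-- def _bracket_tokens(msg):
--     # one left-to-right scan harvesting every '[word]' token (word = nonempty
--     # run of alphanumerics/underscores), instead of probing fixed substrings
--     tokens = []
--     i = 0
--     n = len(msg)
--     while i < n:
--         if msg[i] == '[':
--             j = i + 1
--             while j < n and (msg[j].isalnum() or msg[j] == '_'):
--                 j += 1
--             if j > i + 1 and j < n and msg[j] == ']':
--                 tokens.append(msg[i + 1:j])
--                 i = j + 1
--                 continue
--         i += 1
--     return tokens
--
-- def count_log_levels(log_lines):
--     counts = dict.fromkeys(LEVELS, 0)
--     for line in log_lines:
--         toks = _bracket_tokens(line.get('log', ''))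
--         for level in LEVELS:
--             if level in toks:
--                 counts[level] += 1
--     return counts
-- ===== Notes on version B (the rewrite author's own statement) =====
-- stated objective: alternative
-- what changed: A probes each line's message with six fixed '[LEVEL]' substring searches; B scans each message once, harvesting every bracketed word token '[word]', and then counts which of the six levels occur among the harvested tokens — inverting what is traversed (tags are extracted from the text instead of levels being searched in it).
import Mathlib
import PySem

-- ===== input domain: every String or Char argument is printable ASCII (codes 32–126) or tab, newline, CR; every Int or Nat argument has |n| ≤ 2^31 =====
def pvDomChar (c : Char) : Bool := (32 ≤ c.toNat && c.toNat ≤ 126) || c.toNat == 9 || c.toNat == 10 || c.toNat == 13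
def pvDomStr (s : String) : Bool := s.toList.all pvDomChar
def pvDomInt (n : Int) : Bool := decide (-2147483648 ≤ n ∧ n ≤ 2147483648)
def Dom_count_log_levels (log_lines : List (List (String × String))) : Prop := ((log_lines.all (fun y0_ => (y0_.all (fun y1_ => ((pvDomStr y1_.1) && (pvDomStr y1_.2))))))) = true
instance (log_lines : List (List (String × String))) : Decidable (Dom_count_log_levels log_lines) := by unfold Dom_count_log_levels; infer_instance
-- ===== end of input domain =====

-- B replaces A's six fixed substring probes per line by a single scan of each
-- message harvesting every '[word]' token, then counting the levels among the
-- harvested tokens (alternative algorithm, same asymptotic cost).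

-- ===== PORT A =====
def count_log_levels (log_lines : List (List (String × String))) : List (String × Int) :=
  let init : PySem.Dict String Int :=
    PySem.Dict.mk [("WARN", 0), ("INFO", 0), ("ERROR", 0), ("FATAL", 0), ("DEBUG", 0), ("TRACE", 0)]
  let final := log_lines.foldl (fun counts line =>
    let log_message := (PySem.Dict.mk line).getD "log" ""
    counts.keys.foldl (fun d level =>
      if PySem.Str.isIn ("[" ++ level ++ "]") log_message then
        d.modify level 0 (· + 1)
      else d) counts) init
  final.items

-- ===== PORT B =====
-- helper: Source B's _bracket_tokens scan, on the Chars (List Char) side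
def pvIsWord (c : Char) : Bool := c.isAlphanum || c == '_'

def pvBracketTokens : List Char → List (List Char)
  | [] => []
  | c :: rest =>
    if c = '[' then
      if hok : rest.takeWhile pvIsWord ≠ [] ∧ (rest.dropWhile pvIsWord).head? = some ']' then
        rest.takeWhile pvIsWord :: pvBracketTokens (rest.dropWhile pvIsWord).tail
      else pvBracketTokens rest
    else pvBracketTokens rest
termination_by l => l.length
decreasing_by
  · simp only [List.length_cons]
    have h2 : (rest.dropWhile pvIsWord).length ≤ rest.length := rest.length_dropWhile_le pvIsWord
    have h3 : rest.dropWhile pvIsWord ≠ [] := by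
      intro he; rw [he] at hok; exact (by simpa using hok.2)
    have h4 : (rest.dropWhile pvIsWord).tail.length = (rest.dropWhile pvIsWord).length - 1 :=
      List.length_tail
    have h5 : 0 < (rest.dropWhile pvIsWord).length := List.length_pos_iff.mpr h3
    omega
  · simp
  · simp

def count_log_levels_alt (log_lines : List (List (String × String))) : List (String × Int) :=
  let counts : PySem.Dict String Int :=
    PySem.Dict.mk [("WARN", 0), ("INFO", 0), ("ERROR", 0), ("FATAL", 0), ("DEBUG", 0), ("TRACE", 0)]
  let final := log_lines.foldl (fun counts line =>
    let toks := pvBracketTokens ((PySem.Dict.mk line).getD "log" "").toList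
    ["WARN", "INFO", "ERROR", "FATAL", "DEBUG", "TRACE"].foldl (fun d level =>
      if toks.contains level.toList then d.modify level 0 (· + 1) else d) counts) counts
  final.items

-- ===== PRECONDITION & SPEC =====
def Spec_count_log_levels (log_lines : List (List (String × String))) (out : List (String × Int)) : Prop := out = count_log_levels_alt log_lines
instance (log_lines : List (List (String × String))) (out : List (String × Int)) : Decidable (Spec_count_log_levels log_lines out) := by unfold Spec_count_log_levels; infer_instance

-- ===== CLAIM (what is proved, stated in full; the proofs are below) =====
def Claim_equal_count_log_levels : Prop := ∀ (log_lines : List (List (String × String))), Dom_count_log_levels log_lines → Spec_count_log_levels log_lines (count_log_levels log_lines)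

-- ===== LEMMAS AND PROOFS =====

-- A's per-line hit: does the message contain '[level]' as a substring?
def pvHit (level : String) (line : List (String × String)) : Bool :=
  PySem.Str.isIn ("[" ++ level ++ "]") ((PySem.Dict.mk line).getD "log" "")

-- B's per-line hit: is level among the harvested bracketed tokens?
def pvTokHit (level : String) (line : List (String × String)) : Bool :=
  (pvBracketTokens ((PySem.Dict.mk line).getD "log" "").toList).contains level.toList

-- decomposition of a list that ']' -terminates a word prefix of
lemma pv_take_drop_of_prefix {w rest : List Char} (hall : ∀ c ∈ w, pvIsWord c = true)
    (h : (w ++ [']']) <+: rest) :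
    ∃ t, rest = w ++ ']' :: t ∧ rest.takeWhile pvIsWord = w ∧ rest.dropWhile pvIsWord = ']' :: t := by
  obtain ⟨t, ht⟩ := h
  refine ⟨t, by simpa using ht.symm, ?_, ?_⟩ <;> subst ht <;>
    induction w with
    | nil => simp [pvIsWord]
    | cons a w ih =>
      have ha : pvIsWord a = true := hall a (by simp)
      simp only [List.cons_append, List.takeWhile_cons, List.dropWhile_cons, ha, if_pos]
      first
        | exact congrArg (a :: ·) (ih (fun c hc => hall c (by simp [hc])))
        | exact ih (fun c hc => hall c (by simp [hc]))

-- an occurrence of '[' :: q inside pre ++ tl with '[' ∉ pre lies inside tl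
lemma pv_infix_skip {q tl : List Char} (pre : List Char) (hpre : '[' ∉ pre) :
    ('[' :: q) <:+: (pre ++ tl) ↔ ('[' :: q) <:+: tl := by
  induction pre with
  | nil => simp
  | cons a pre ih =>
    have ha : a ≠ '[' := fun h => hpre (by simp [h])
    rw [List.cons_append, List.infix_cons_iff]
    constructor
    · rintro (hp | hi)
      · rcases hp with ⟨t, ht⟩
        simp only [List.cons_append] at ht
        exact absurd (List.head_eq_of_cons_eq ht).symm ha
      · exact (ih (fun h => hpre (by simp [h]))).mp hi
    · intro h; exact Or.inr ((ih (fun h => hpre (by simp [h]))).mpr h)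

-- the key lemma: a level appears among the harvested tokens iff '[level]' is a substring
lemma pv_tokens_mem_iff (w : List Char) (hw : w ≠ []) (hall : ∀ c ∈ w, pvIsWord c = true) :
    ∀ msg : List Char, (w ∈ pvBracketTokens msg ↔ ('[' :: (w ++ [']'])) <:+: msg) := by
  intro msg
  induction msg using pvBracketTokens.induct with
  | case1 => simp [pvBracketTokens]
  | case2 rest hcond ih =>
    -- success: token harvested, recurse past the closing bracket
    obtain ⟨hrun, hhead⟩ := hcond
    obtain ⟨tail, hdrop⟩ : ∃ t, rest.dropWhile pvIsWord = ']' :: t := by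
      rcases hd : rest.dropWhile pvIsWord with _ | ⟨d, t⟩
      · rw [hd] at hhead; simp at hhead
      · rw [hd] at hhead; simp at hhead; exact ⟨t, by rw [hhead]⟩
    have hdecomp : rest = rest.takeWhile pvIsWord ++ ']' :: tail := by
      conv_lhs => rw [← List.takeWhile_append_dropWhile (p := pvIsWord) (l := rest)]
      rw [hdrop]
    have hrunword : ∀ c ∈ rest.takeWhile pvIsWord, pvIsWord c = true :=
      fun c hc => List.mem_takeWhile_imp hc
    rw [hdrop, List.tail_cons] at ih
    rw [pvBracketTokens, if_pos rfl, dif_pos ⟨hrun, hhead⟩, hdrop]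
    rw [List.tail_cons, List.mem_cons, List.infix_cons_iff, ih]
    generalize hg : rest.takeWhile pvIsWord = run at hrun hrunword hdecomp ⊢
    clear hg hdrop hhead
    subst hdecomp
    have hnolb : '[' ∉ run ++ [']'] := by
      intro hm
      rcases List.mem_append.mp hm with h1 | h1
      · have := hrunword _ h1; simp [pvIsWord] at this
      · simp at h1
    constructor
    · rintro (heq | hmem)
      · subst heq
        exact Or.inl ⟨tail, by simp⟩
      · exact Or.inr (by
          rw [show run ++ ']' :: tail = (run ++ [']']) ++ tail by simp,
              pv_infix_skip _ hnolb]
          exact hmem)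
    · rintro (hp | hi)
      · rcases hp with ⟨t, ht⟩
        simp only [List.cons_append] at ht
        have hpre : (w ++ [']']) <+: run ++ ']' :: tail := ⟨t, by
          have := List.tail_eq_of_cons_eq ht; simpa using this⟩
        obtain ⟨t', heq, htake, _⟩ := pv_take_drop_of_prefix hall hpre
        obtain ⟨t'', heq', htake', _⟩ :=
          pv_take_drop_of_prefix hrunword (rest := run ++ ']' :: tail) ⟨tail, by simp⟩
        exact Or.inl (htake.symm.trans htake')
      · refine Or.inr ?_
        rw [show run ++ ']' :: tail = (run ++ [']']) ++ tail by simp,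
            pv_infix_skip _ hnolb] at hi
        exact hi
  | case3 rest hcond ih =>
    -- failure: empty run or no closing bracket right after it
    rw [pvBracketTokens, if_pos rfl, dif_neg hcond, ih, List.infix_cons_iff]
    constructor
    · exact Or.inr
    · rintro (hp | hi)
      · rcases hp with ⟨t, ht⟩
        simp only [List.cons_append] at ht
        have hpre : (w ++ [']']) <+: rest := ⟨t, by
          have := List.tail_eq_of_cons_eq ht; simpa using this⟩
        obtain ⟨t', heq, htake, hdw⟩ := pv_take_drop_of_prefix hall hpre
        exact absurd ⟨htake ▸ hw, by rw [hdw]; rfl⟩ hcond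
      · exact hi
  | case4 c rest hc ih =>
    rw [pvBracketTokens, if_neg hc, ih, List.infix_cons_iff]
    constructor
    · exact Or.inr
    · rintro (hp | hi)
      · rcases hp with ⟨t, ht⟩
        simp only [List.cons_append] at ht
        exact absurd (List.head_eq_of_cons_eq ht).symm hc
      · exact hi

-- the two per-line hit tests agree on each of the six levels
lemma pv_hit_eq (lvl : String) (hw : lvl.toList ≠ [])
    (hall : ∀ c ∈ lvl.toList, pvIsWord c = true) :
    pvHit lvl = pvTokHit lvl := by
  funext line
  unfold pvHit pvTokHit
  rw [Bool.eq_iff_iff, PySem.Str.isIn_iff_infix, List.contains_iff_mem,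
      pv_tokens_mem_iff lvl.toList hw hall]
  constructor <;> intro h <;> simpa using h

-- one outer-loop step of A on the literal six-key dict
set_option maxHeartbeats 1600000 in
lemma pvStep (a b c d e f : Int) (line : List (String × String)) :
    (let log_message := (PySem.Dict.mk line).getD "log" ""
     (PySem.Dict.mk [("WARN", a), ("INFO", b), ("ERROR", c), ("FATAL", d), ("DEBUG", e), ("TRACE", f)]).keys.foldl
       (fun d level =>
         if PySem.Str.isIn ("[" ++ level ++ "]") log_message then d.modify level 0 (· + 1) else d)
       (PySem.Dict.mk [("WARN", a), ("INFO", b), ("ERROR", c), ("FATAL", d), ("DEBUG", e), ("TRACE", f)]))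
    = PySem.Dict.mk [("WARN", a + if pvHit "WARN" line then 1 else 0),
                     ("INFO", b + if pvHit "INFO" line then 1 else 0),
                     ("ERROR", c + if pvHit "ERROR" line then 1 else 0),
                     ("FATAL", d + if pvHit "FATAL" line then 1 else 0),
                     ("DEBUG", e + if pvHit "DEBUG" line then 1 else 0),
                     ("TRACE", f + if pvHit "TRACE" line then 1 else 0)] := by
  simp only [PySem.Dict.keys, List.map, List.foldl, pvHit]
  split_ifs <;>
    simp [PySem.Dict.modify, PySem.Dict.insert, PySem.Dict.getD, PySem.Dict.get?,
          PySem.Dict.contains]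

-- one outer-loop step of B on the literal six-key dict
set_option maxHeartbeats 1600000 in
lemma pvStepB (a b c d e f : Int) (line : List (String × String)) :
    (let toks := pvBracketTokens ((PySem.Dict.mk line).getD "log" "").toList
     ["WARN", "INFO", "ERROR", "FATAL", "DEBUG", "TRACE"].foldl
       (fun d level => if toks.contains level.toList then d.modify level 0 (· + 1) else d)
       (PySem.Dict.mk [("WARN", a), ("INFO", b), ("ERROR", c), ("FATAL", d), ("DEBUG", e), ("TRACE", f)]))
    = PySem.Dict.mk [("WARN", a + if pvTokHit "WARN" line then 1 else 0),
                     ("INFO", b + if pvTokHit "INFO" line then 1 else 0),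
                     ("ERROR", c + if pvTokHit "ERROR" line then 1 else 0),
                     ("FATAL", d + if pvTokHit "FATAL" line then 1 else 0),
                     ("DEBUG", e + if pvTokHit "DEBUG" line then 1 else 0),
                     ("TRACE", f + if pvTokHit "TRACE" line then 1 else 0)] := by
  simp only [List.foldl, pvTokHit]
  split_ifs <;>
    simp [PySem.Dict.modify, PySem.Dict.insert, PySem.Dict.getD, PySem.Dict.get?,
          PySem.Dict.contains]

-- a whole fold over the lines, with symbolic accumulators (shared by A and B via the hit function)
lemma pvFoldGen (hit : String → List (String × String) → Bool)
    (step : PySem.Dict String Int → List (String × String) → PySem.Dict String Int)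
    (hstep : ∀ a b c d e f line,
      step (PySem.Dict.mk [("WARN", a), ("INFO", b), ("ERROR", c), ("FATAL", d), ("DEBUG", e), ("TRACE", f)]) line
      = PySem.Dict.mk [("WARN", a + if hit "WARN" line then 1 else 0),
                       ("INFO", b + if hit "INFO" line then 1 else 0),
                       ("ERROR", c + if hit "ERROR" line then 1 else 0),
                       ("FATAL", d + if hit "FATAL" line then 1 else 0),
                       ("DEBUG", e + if hit "DEBUG" line then 1 else 0),
                       ("TRACE", f + if hit "TRACE" line then 1 else 0)])
    (lines : List (List (String × String))) :
    ∀ a b c d e f : Int,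
    lines.foldl step (PySem.Dict.mk [("WARN", a), ("INFO", b), ("ERROR", c), ("FATAL", d), ("DEBUG", e), ("TRACE", f)])
    = PySem.Dict.mk [("WARN", a + (lines.countP (hit "WARN") : Int)),
                     ("INFO", b + (lines.countP (hit "INFO") : Int)),
                     ("ERROR", c + (lines.countP (hit "ERROR") : Int)),
                     ("FATAL", d + (lines.countP (hit "FATAL") : Int)),
                     ("DEBUG", e + (lines.countP (hit "DEBUG") : Int)),
                     ("TRACE", f + (lines.countP (hit "TRACE") : Int))] := by
  induction lines with
  | nil => simp
  | cons line rest ih =>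
    intro a b c d e f
    rw [List.foldl_cons, hstep, ih]
    simp only [List.countP_cons, PySem.Dict.mk.injEq, List.cons.injEq, Prod.mk.injEq,
               and_true, true_and]
    refine ⟨?_, ?_, ?_, ?_, ?_, ?_⟩ <;> (split_ifs <;> push_cast <;> ring)

-- ===== VERDICT (by name: the statement is the Claim_ definition above) =====
set_option maxRecDepth 8192 in
theorem count_log_levels_spec : Claim_equal_count_log_levels := by
  intro log_lines _
  unfold Spec_count_log_levels count_log_levels count_log_levels_alt
  dsimp only
  rw [pvFoldGen pvHit _ (fun a b c d e f line => pvStep a b c d e f line) log_lines,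
      pvFoldGen pvTokHit _ (fun a b c d e f line => pvStepB a b c d e f line) log_lines]
  rw [pv_hit_eq "WARN" (by simp) (by simp [pvIsWord]),
      pv_hit_eq "INFO" (by simp) (by simp [pvIsWord]),
      pv_hit_eq "ERROR" (by simp) (by simp [pvIsWord]),
      pv_hit_eq "FATAL" (by simp) (by simp [pvIsWord]),
      pv_hit_eq "DEBUG" (by simp) (by simp [pvIsWord]),
      pv_hit_eq "TRACE" (by simp) (by simp [pvIsWord])]
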